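-- pv_equiv track=rewrite | github.com/dannymateo/naval-battle | backend/main.py | validar_posicion_continua
-- ===== SOURCE A (Python) =====
-- def validar_posicion_continua(posiciones, tamaño):
--     if len(posiciones) != tamaño:
--         return False
--
--     # Convertir posiciones a coordenadas numéricas
--     coords = [(ord(pos[0]) - ord('A'), int(pos[1])) for pos in posiciones]
--     coords.sort()
--
--     # Verificar si están en la misma fila o columna
--     misma_fila = all(c[0] == coords[0][0] for c in coords)
--     misma_columna = all(c[1] == coords[0][1] for c in coords)
--
--     if not (misma_fila or misma_columna):
--         return False
--
--     # Verificar si son continuas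
--     if misma_fila:
--         return all(coords[i+1][1] - coords[i][1] == 1 for i in range(len(coords)-1))
--     else:
--         return all(coords[i+1][0] - coords[i][0] == 1 for i in range(len(coords)-1))
-- ===== SOURCE B (Python) =====
-- def validar_posicion_continua(posiciones, tamaño):
--     if len(posiciones) != tamaño:
--         return False
--
--     coords = [(ord(pos[0]) - ord('A'), int(pos[1])) for pos in posiciones]
--     if len(coords) <= 1:
--         return True
--
--     rows = [r for r, _ in coords]
--     cols = [c for _, c in coords]
--     misma_fila = len(set(rows)) == 1
--     misma_columna = len(set(cols)) == 1
--     if not (misma_fila or misma_columna):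
--         return False
--
--     vals = cols if misma_fila else rows
--     return len(set(vals)) == len(vals) and max(vals) - min(vals) == len(vals) - 1
-- ===== Notes on version B (the rewrite author's own statement) =====
-- stated objective: simpler
-- what changed: B drops A's sort-then-scan-adjacent-differences pass entirely: after the same length check and coordinate parsing, it decides contiguity arithmetically on the unsorted varying axis via len(set(vals)) == len(vals) and max(vals) - min(vals) == len(vals) - 1, and detects same-row/same-column with len(set(...)) == 1 instead of comparing everything against the first sorted element.
import Mathlib
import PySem

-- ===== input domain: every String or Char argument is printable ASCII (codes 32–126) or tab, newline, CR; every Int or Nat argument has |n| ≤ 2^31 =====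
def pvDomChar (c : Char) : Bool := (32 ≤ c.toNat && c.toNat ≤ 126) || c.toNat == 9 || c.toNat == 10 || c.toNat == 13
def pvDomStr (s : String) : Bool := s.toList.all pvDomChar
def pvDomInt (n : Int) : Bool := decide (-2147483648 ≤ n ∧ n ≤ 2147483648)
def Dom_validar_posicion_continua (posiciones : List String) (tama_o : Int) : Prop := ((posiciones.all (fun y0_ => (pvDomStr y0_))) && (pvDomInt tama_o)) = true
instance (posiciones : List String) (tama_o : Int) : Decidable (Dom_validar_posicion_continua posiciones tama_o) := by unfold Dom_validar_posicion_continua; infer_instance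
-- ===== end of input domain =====

-- B replaces A's sort + adjacent-difference scan by a set/min/max contiguity test on the unsorted varying axis (objective: simpler; return value only, A also mutates no argument visible to the caller — its sort acts on a local list).


-- ===== PORT A =====
-- shared by both ports: (ord(pos[0]) - ord('A'), int(pos[1])); none = IndexError/ValueError (excluded by Pre_)
def pvParseCoord (pos : String) : Option (Int × Int) :=
  match PySem.Str.pyGet? pos 0, PySem.Str.pyGet? pos 1 with
  | some c0, some c1 =>
    match PySem.Int.ofChars? [c1] with
    | some n => some (((c0.toNat : Int) - 65, n))
    | none => none
  | _, _ => none

-- A's body after the parse: sort, compare everything to coords[0], scan adjacent differences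
def pvContinuaA (coords0 : List (Int × Int)) : Bool :=
  let coords := PySem.List.sorted2 coords0 Prod.fst Prod.snd
  let misma_fila := coords.all (fun c => c.1 == (PySem.List.pyGetD coords 0 (0, 0)).1)
  let misma_columna := coords.all (fun c => c.2 == (PySem.List.pyGetD coords 0 (0, 0)).2)
  if !(misma_fila || misma_columna) then false
  else if misma_fila then
    (PySem.List.pyRange 0 (PySem.List.len coords - 1)).all
      (fun i => (PySem.List.pyGetD coords (i + 1) (0, 0)).2 - (PySem.List.pyGetD coords i (0, 0)).2 == 1)
  else
    (PySem.List.pyRange 0 (PySem.List.len coords - 1)).all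
      (fun i => (PySem.List.pyGetD coords (i + 1) (0, 0)).1 - (PySem.List.pyGetD coords i (0, 0)).1 == 1)

def validar_posicion_continua (posiciones : List String) (tama_o : Int) : Bool :=
  if PySem.List.len posiciones ≠ tama_o then false
  else
    match posiciones.mapM pvParseCoord with
    | none => false   -- Python raises here (outside Pre_)
    | some coords0 => pvContinuaA coords0

-- ===== PORT B =====
-- B's body after the parse: no sort — set/min/max contiguity test on the varying axis
def pvContinuaB (coords : List (Int × Int)) : Bool :=
  if coords.length ≤ 1 then true
  else
    let rows := coords.map Prod.fst
    let cols := coords.map Prod.snd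
    let misma_fila := PySem.Set.len (PySem.Set.ofList rows) == 1
    let misma_columna := PySem.Set.len (PySem.Set.ofList cols) == 1
    if !(misma_fila || misma_columna) then false
    else
      let vals := if misma_fila then cols else rows
      (PySem.Set.len (PySem.Set.ofList vals) == PySem.List.len vals) &&
      (match PySem.List.max? vals (fun v => v), PySem.List.min? vals (fun v => v) with
       | some mx, some mn => mx - mn == PySem.List.len vals - 1
       | _, _ => false)

def validar_posicion_continua_alt (posiciones : List String) (tama_o : Int) : Bool :=
  if PySem.List.len posiciones ≠ tama_o then false
  else
    match posiciones.mapM pvParseCoord with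
    | none => false   -- Python raises here (outside Pre_)
    | some coords => pvContinuaB coords

-- ===== PRECONDITION & SPEC =====
-- Pre_ excludes exactly the inputs where Python A raises: when len(posiciones) == tamaño, each position
-- must have at least 2 characters (else IndexError) and a digit as 2nd character (else ValueError on int()).
def Pre_validar_posicion_continua (posiciones : List String) (tama_o : Int) : Prop :=
  (posiciones.length : Int) = tama_o →
    ∀ pos ∈ posiciones, 2 ≤ pos.toList.length ∧ (pos.toList.getD 1 ' ').isDigit = true
instance (posiciones : List String) (tama_o : Int) : Decidable (Pre_validar_posicion_continua posiciones tama_o) := by unfold Pre_validar_posicion_continua; infer_instance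

def pvWitness_validar_posicion_continua : List String × Int := (["A1", "A2"], 2)

def Spec_validar_posicion_continua (posiciones : List String) (tama_o : Int) (out : Bool) : Prop := out = validar_posicion_continua_alt posiciones tama_o
instance (posiciones : List String) (tama_o : Int) (out : Bool) : Decidable (Spec_validar_posicion_continua posiciones tama_o out) := by unfold Spec_validar_posicion_continua; infer_instance

-- ===== CLAIM (what is proved, stated in full; the proofs are below) =====
def Claim_equal_validar_posicion_continua : Prop := ∀ (posiciones : List String) (tama_o : Int), Dom_validar_posicion_continua posiciones tama_o → Pre_validar_posicion_continua posiciones tama_o → Spec_validar_posicion_continua posiciones tama_o (validar_posicion_continua posiciones tama_o)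

-- ===== LEMMAS AND PROOFS =====

-- the comparison sorted2 uses (lexicographic on (fst, snd)), and the order it produces
def pvLexBefore (a b : Int × Int) : Bool :=
  decide (a.1 < b.1) || (!decide (b.1 < a.1) && decide (a.2 < b.2))

def pvLexLe (a b : Int × Int) : Prop := a.1 < b.1 ∨ (a.1 = b.1 ∧ a.2 ≤ b.2)

lemma pvLexBefore_true {a b : Int × Int} (h : pvLexBefore a b = true) : pvLexLe a b := by
  simp [pvLexBefore] at h; unfold pvLexLe; omega

lemma pvLexBefore_false {a b : Int × Int} (h : pvLexBefore a b = false) : pvLexLe b a := by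
  simp [pvLexBefore] at h; unfold pvLexLe; omega

lemma pvLexLe_trans {a b c : Int × Int} (h1 : pvLexLe a b) (h2 : pvLexLe b c) : pvLexLe a c := by
  unfold pvLexLe at *; omega

lemma pvLexLe_fst {a b : Int × Int} (h : pvLexLe a b) : a.1 ≤ b.1 := by
  unfold pvLexLe at h; omega

lemma pvLexLe_snd {a b : Int × Int} (h : pvLexLe a b) (hf : a.1 = b.1) : a.2 ≤ b.2 := by
  unfold pvLexLe at h; omega

lemma pvInsertBy_pairwise (x : Int × Int) (ys : List (Int × Int))
    (h : List.Pairwise pvLexLe ys) :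
    List.Pairwise pvLexLe (PySem.List.insertBy pvLexBefore x ys) := by
  induction ys with
  | nil => simp [PySem.List.insertBy]
  | cons y ys ih =>
    rw [List.pairwise_cons] at h
    obtain ⟨hy, hys⟩ := h
    by_cases hb : pvLexBefore x y = true
    · rw [show PySem.List.insertBy pvLexBefore x (y :: ys) = x :: y :: ys from by
        simp [PySem.List.insertBy, hb]]
      rw [List.pairwise_cons]
      refine ⟨?_, List.pairwise_cons.mpr ⟨hy, hys⟩⟩
      intro b hb'
      rcases List.mem_cons.mp hb' with rfl | hmem
      · exact pvLexBefore_true hb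
      · exact pvLexLe_trans (pvLexBefore_true hb) (hy b hmem)
    · rw [show PySem.List.insertBy pvLexBefore x (y :: ys) = y :: PySem.List.insertBy pvLexBefore x ys from by
        simp [PySem.List.insertBy, hb]]
      rw [List.pairwise_cons]
      refine ⟨?_, ih hys⟩
      intro b hb'
      rcases (PySem.List.mem_insertBy pvLexBefore x b ys).mp hb' with rfl | hmem
      · exact pvLexBefore_false (by simpa using hb)
      · exact hy b hmem

lemma pvFoldl_pairwise (xs : List (Int × Int)) (acc : List (Int × Int))
    (h : List.Pairwise pvLexLe acc) :
    List.Pairwise pvLexLe (xs.foldl (fun acc x => PySem.List.insertBy pvLexBefore x acc) acc) := by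
  induction xs generalizing acc with
  | nil => simpa
  | cons x xs ih => exact ih _ (pvInsertBy_pairwise x acc h)

lemma pvSorted2_eq_foldl (xs : List (Int × Int)) :
    PySem.List.sorted2 xs Prod.fst Prod.snd
      = xs.foldl (fun acc x => PySem.List.insertBy pvLexBefore x acc) [] := rfl

lemma pvSorted2_pairwise (xs : List (Int × Int)) :
    List.Pairwise pvLexLe (PySem.List.sorted2 xs Prod.fst Prod.snd) := by
  rw [pvSorted2_eq_foldl]
  exact pvFoldl_pairwise xs [] (by simp)

-- len(set(xs)) == 1  ⟺  all elements equal (any fixed member a)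
lemma pvLenOfListOne_iff (xs : List Int) (a : Int) (ha : a ∈ xs) :
    (PySem.Set.ofList xs).length = 1 ↔ ∀ x ∈ xs, x = a := by
  constructor
  · intro h x hx
    obtain ⟨b, hb⟩ := List.length_eq_one_iff.mp h
    have hxa : x ∈ PySem.Set.ofList xs := (PySem.Set.mem_ofList xs x).mpr hx
    have haa : a ∈ PySem.Set.ofList xs := (PySem.Set.mem_ofList xs a).mpr ha
    rw [hb] at hxa haa
    simp at hxa haa
    omega
  · intro h
    have hnd := PySem.Set.nodup_ofList xs
    have hmem : a ∈ PySem.Set.ofList xs := (PySem.Set.mem_ofList xs a).mpr ha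
    have hall : ∀ y ∈ PySem.Set.ofList xs, y = a := fun y hy =>
      h y ((PySem.Set.mem_ofList xs y).mp hy)
    cases hd : PySem.Set.ofList xs with
    | nil => rw [hd] at hmem; simp at hmem
    | cons b rest =>
      rw [hd] at hall hnd
      have hb : b = a := hall b (by simp)
      have hrest : rest = [] := by
        cases rest with
        | nil => rfl
        | cons c r2 =>
          have hc : c = a := hall c (by simp)
          rw [List.nodup_cons] at hnd
          exact absurd (by simp [hb, hc] : b ∈ c :: r2) hnd.1
      simp [hrest]

-- len(set(xs)) == len(xs)  ⟺  no duplicates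
lemma pvLenOfListEq_iff (xs : List Int) :
    (PySem.Set.ofList xs).length = xs.length ↔ xs.Nodup := by
  constructor
  · intro h
    have hperm : (PySem.Set.ofList xs).Perm xs.dedup := by
      rw [List.perm_ext_iff_of_nodup (PySem.Set.nodup_ofList xs) (List.nodup_dedup xs)]
      intro a
      rw [PySem.Set.mem_ofList, List.mem_dedup]
    have hlen : xs.dedup.length = xs.length := by rw [← hperm.length_eq, h]
    exact List.dedup_eq_self.mp ((List.dedup_sublist xs).eq_of_length hlen)
  · intro h
    rw [PySem.Set.ofList_eq_self_of_nodup xs h]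

-- A's adjacent-difference scan, index-free form
lemma pvRangeAll_iff (s : List (Int × Int)) (g : Int × Int → Int) :
    ((PySem.List.pyRange 0 (PySem.List.len s - 1)).all
      (fun i => g (PySem.List.pyGetD s (i + 1) (0, 0)) - g (PySem.List.pyGetD s i (0, 0)) == 1)) = true
    ↔ ∀ k : Nat, k + 1 < s.length → g (s.getD (k + 1) (0, 0)) - g (s.getD k (0, 0)) = 1 := by
  rw [List.all_eq_true]
  constructor
  · intro h k hk
    have hmem : (k : Int) ∈ PySem.List.pyRange 0 (PySem.List.len s - 1) := by
      rw [PySem.List.mem_pyRange_one]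
      simp [PySem.List.len]
      omega
    have h1 := h (k : Int) hmem
    have he : ((k : Int) + 1) = ((k + 1 : Nat) : Int) := by push_cast; ring
    rw [he, PySem.List.pyGetD_natCast, PySem.List.pyGetD_natCast, beq_iff_eq] at h1
    exact h1
  · intro h i hi
    rw [PySem.List.mem_pyRange_one] at hi
    simp [PySem.List.len] at hi
    obtain ⟨hi0, hi1⟩ := hi
    have hk := h i.toNat (by omega)
    have he : i = ((i.toNat : Nat) : Int) := by omega
    have he1 : i + 1 = ((i.toNat + 1 : Nat) : Int) := by omega
    rw [he1, PySem.List.pyGetD_natCast, he, PySem.List.pyGetD_natCast, beq_iff_eq]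
    exact hk

-- adjacent differences all 1 on a sorted list ⟺ distinct values spanning a contiguous range
lemma pvChain_iff (t vals : List Int) (mx mn : Int)
    (hp : t.Perm vals)
    (hs : ∀ i j : Nat, i < j → j < t.length → t.getD i 0 ≤ t.getD j 0)
    (h2 : 2 ≤ t.length)
    (hmxm : mx ∈ vals) (hmx : ∀ y ∈ vals, y ≤ mx)
    (hmnm : mn ∈ vals) (hmn : ∀ y ∈ vals, mn ≤ y) :
    (∀ k : Nat, k + 1 < t.length → t.getD (k + 1) 0 - t.getD k 0 = 1)
      ↔ (vals.Nodup ∧ mx - mn = (vals.length : Int) - 1) := by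
  have hlen := hp.length_eq
  have hmemt : ∀ x : Int, x ∈ t ↔ x ∈ vals := fun x => hp.mem_iff
  have hmn0 : mn = t.getD 0 0 := by
    have ha : t.getD 0 0 ∈ t := by
      rw [List.getD_eq_getElem t 0 (by omega)]
      exact List.getElem_mem _
    have h1 : mn ≤ t.getD 0 0 := hmn _ ((hmemt _).mp ha)
    obtain ⟨k, hk, hke⟩ := List.mem_iff_getElem.mp ((hmemt mn).mpr hmnm)
    have hkv : t.getD k 0 = mn := by rw [List.getD_eq_getElem t 0 hk]; exact hke
    have h2' : t.getD 0 0 ≤ t.getD k 0 := by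
      rcases Nat.eq_zero_or_pos k with rfl | hpos
      · exact le_refl _
      · exact hs 0 k hpos hk
    omega
  have hmx0 : mx = t.getD (t.length - 1) 0 := by
    have ha : t.getD (t.length - 1) 0 ∈ t := by
      rw [List.getD_eq_getElem t 0 (by omega)]
      exact List.getElem_mem _
    have h1 : t.getD (t.length - 1) 0 ≤ mx := hmx _ ((hmemt _).mp ha)
    obtain ⟨k, hk, hke⟩ := List.mem_iff_getElem.mp ((hmemt mx).mpr hmxm)
    have hkv : t.getD k 0 = mx := by rw [List.getD_eq_getElem t 0 hk]; exact hke
    have h2' : t.getD k 0 ≤ t.getD (t.length - 1) 0 := by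
      rcases Nat.lt_or_ge k (t.length - 1) with hlt | hge
      · exact hs k (t.length - 1) hlt (by omega)
      · have : k = t.length - 1 := by omega
        rw [this]
    omega
  constructor
  · intro hchain
    have haux : ∀ k : Nat, k < t.length → t.getD k 0 = t.getD 0 0 + (k : Int) := by
      intro k
      induction k with
      | zero => intro _; simp
      | succ k ih =>
        intro hk
        have h1 := hchain k hk
        have h2'' := ih (by omega)
        push_cast
        omega
    constructor
    · refine (hp.nodup_iff).mp ?_
      refine List.pairwise_iff_getElem.mpr ?_
      intro i j hi hj hij
      have h1 := haux i (by omega)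
      have h2' := haux j (by omega)
      rw [List.getD_eq_getElem t 0 hi] at h1
      rw [List.getD_eq_getElem t 0 hj] at h2'
      omega
    · have h1 := haux (t.length - 1) (by omega)
      rw [hmx0, hmn0, ← hlen]
      omega
  · rintro ⟨hnd, hspan⟩
    have htnd : t.Nodup := (hp.nodup_iff).mpr hnd
    have hstrict : ∀ i j : Nat, i < j → j < t.length → t.getD i 0 < t.getD j 0 := by
      intro i j hij hj
      have hle := hs i j hij hj
      have hne' : t.getD i 0 ≠ t.getD j 0 := by
        rw [List.getD_eq_getElem t 0 (by omega), List.getD_eq_getElem t 0 hj]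
        exact List.pairwise_iff_getElem.mp htnd i j (by omega) hj hij
      omega
    have hgap : ∀ d i : Nat, i + d < t.length → t.getD i 0 + (d : Int) ≤ t.getD (i + d) 0 := by
      intro d
      induction d with
      | zero => intro i h; simp
      | succ d ih =>
        intro i h
        have h1 := ih i (by omega)
        have h2'' := hstrict (i + d) (i + d + 1) (by omega) (by omega)
        have he : i + (d + 1) = (i + d) + 1 := rfl
        rw [he]
        push_cast
        omega
    intro k hk
    have g1 := hgap k 0 (by omega)
    rw [Nat.zero_add] at g1
    have g2 := hgap (t.length - 1 - (k + 1)) (k + 1) (by omega)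
    have he2 : (k + 1) + (t.length - 1 - (k + 1)) = t.length - 1 := by omega
    rw [he2] at g2
    have g3 := hstrict k (k + 1) (by omega) hk
    rw [hmx0, hmn0, ← hlen] at hspan
    omega

-- A's "all equal to coords[0]" test ⟺ B's len(set(...)) == 1, on either axis g
lemma pvMf_iff (coords0 s : List (Int × Int)) (g : Int × Int → Int)
    (hperm : s.Perm coords0) (hne : coords0 ≠ []) :
    (s.all (fun c => g c == g (PySem.List.pyGetD s 0 (0, 0))) = true)
      ↔ (PySem.Set.ofList (coords0.map g)).length = 1 := by
  have hlens : s.length = coords0.length := hperm.length_eq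
  have h0 : 0 < s.length := by
    rcases coords0 with _ | _
    · exact absurd rfl hne
    · simp at hlens; omega
  have hgd : PySem.List.pyGetD s 0 (0, 0) = s.getD 0 (0, 0) := PySem.List.pyGetD_zero s (0, 0)
  have hmem0 : s.getD 0 (0, 0) ∈ s := by
    rw [List.getD_eq_getElem s (0, 0) h0]
    exact List.getElem_mem _
  have ha : g (s.getD 0 (0, 0)) ∈ coords0.map g :=
    List.mem_map_of_mem (hperm.mem_iff.mp hmem0)
  rw [List.all_eq_true, pvLenOfListOne_iff (coords0.map g) (g (s.getD 0 (0, 0))) ha, hgd]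
  constructor
  · intro h x hx
    obtain ⟨c, hc, rfl⟩ := List.mem_map.mp hx
    exact beq_iff_eq.mp (h c (hperm.mem_iff.mpr hc))
  · intro h c hc
    rw [beq_iff_eq]
    exact h (g c) (List.mem_map_of_mem (hperm.mem_iff.mp hc))

-- the per-branch equivalence: A's adjacent scan along axis g = B's set/min/max test on coords0.map g
lemma pvBranch (coords0 s : List (Int × Int)) (g : Int × Int → Int)
    (hperm : s.Perm coords0) (hn : 2 ≤ coords0.length)
    (hsorted : ∀ i j : Nat, i < j → j < s.length →
      g (s.getD i (0, 0)) ≤ g (s.getD j (0, 0))) :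
    ((PySem.List.pyRange 0 (PySem.List.len s - 1)).all
      (fun i => g (PySem.List.pyGetD s (i + 1) (0, 0)) - g (PySem.List.pyGetD s i (0, 0)) == 1))
    = ((PySem.Set.len (PySem.Set.ofList (coords0.map g)) == PySem.List.len (coords0.map g)) &&
       (match PySem.List.max? (coords0.map g) (fun v => v), PySem.List.min? (coords0.map g) (fun v => v) with
        | some mx, some mn => mx - mn == PySem.List.len (coords0.map g) - 1
        | _, _ => false)) := by
  have hlens : s.length = coords0.length := hperm.length_eq
  set vals := coords0.map g with hvals
  have hvne : vals ≠ [] := by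
    rcases coords0 with _ | _
    · simp at hn
    · simp [hvals]
  cases hmxe : PySem.List.max? vals (fun v => v) with
  | none => exact absurd ((PySem.List.max?_eq_none_iff vals _).mp hmxe) hvne
  | some mx =>
    cases hmne : PySem.List.min? vals (fun v => v) with
    | none => exact absurd ((PySem.List.min?_eq_none_iff vals _).mp hmne) hvne
    | some mn =>
      -- t := s.map g, bridge getD of t with g of getD of s
      have hgd : ∀ k : Nat, k < s.length → (s.map g).getD k 0 = g (s.getD k (0, 0)) := by
        intro k hk
        rw [List.getD_eq_getElem (s.map g) 0 (by simpa), List.getD_eq_getElem s (0, 0) hk,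
          List.getElem_map]
      have hpt : (s.map g).Perm vals := hperm.map g
      have hchain := pvChain_iff (s.map g) vals mx mn hpt
        (by
          intro i j hij hj
          rw [List.length_map] at hj
          rw [hgd i (by omega), hgd j hj]
          exact hsorted i j hij hj)
        (by rw [List.length_map]; omega)
        (PySem.List.max?_mem hmxe) (fun y hy => PySem.List.max?_isMax hmxe y hy)
        (PySem.List.min?_mem hmne) (fun y hy => PySem.List.min?_isMin hmne y hy)
      rw [Bool.eq_iff_iff, pvRangeAll_iff s g]
      show (∀ k : Nat, k + 1 < s.length →
          g (s.getD (k + 1) (0, 0)) - g (s.getD k (0, 0)) = 1)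
        ↔ ((PySem.Set.len (PySem.Set.ofList vals) == PySem.List.len vals) &&
           (mx - mn == PySem.List.len vals - 1)) = true
      constructor
      · intro h
        have hc : ∀ k : Nat, k + 1 < (s.map g).length →
            (s.map g).getD (k + 1) 0 - (s.map g).getD k 0 = 1 := by
          intro k hk
          rw [List.length_map] at hk
          rw [hgd (k + 1) hk, hgd k (by omega)]
          exact h k hk
        obtain ⟨hnd, hspan⟩ := hchain.mp hc
        simp [PySem.Set.len, PySem.List.len, beq_iff_eq]
        refine ⟨?_, ?_⟩
        · exact_mod_cast congrArg (fun n : Nat => (n : Int)) ((pvLenOfListEq_iff vals).mpr hnd)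
        · omega
      · intro h
        simp [PySem.Set.len, PySem.List.len, beq_iff_eq] at h
        obtain ⟨h1, h2⟩ := h
        have hnd : vals.Nodup := (pvLenOfListEq_iff vals).mp (by exact_mod_cast h1)
        have hc := hchain.mpr ⟨hnd, by omega⟩
        intro k hk
        have := hc k (by rw [List.length_map]; omega)
        rw [hgd (k + 1) (by omega), hgd k (by omega)] at this
        exact this

-- the whole post-parse body: A = B
lemma pvContinua_eq (coords0 : List (Int × Int)) :
    pvContinuaA coords0 = pvContinuaB coords0 := by
  by_cases hsmall : coords0.length ≤ 1
  · rcases coords0 with _ | ⟨c, _ | ⟨d, rest⟩⟩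
    · decide
    · have h1 : PySem.List.sorted2 [c] Prod.fst Prod.snd = [c] := rfl
      simp [pvContinuaA, pvContinuaB, h1]
    · simp at hsmall
  · have hn : 2 ≤ coords0.length := by omega
    simp only [pvContinuaA, pvContinuaB]
    set s := PySem.List.sorted2 coords0 Prod.fst Prod.snd
    have hperm : s.Perm coords0 := PySem.List.sorted2_perm coords0 Prod.fst Prod.snd false
    have hlex : List.Pairwise pvLexLe s := pvSorted2_pairwise coords0
    have hne : coords0 ≠ [] := by
      intro h
      rw [h] at hn
      simp at hn
    have hpw : ∀ i j : Nat, i < j → j < s.length →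
        pvLexLe (s.getD i (0, 0)) (s.getD j (0, 0)) := by
      intro i j hij hj
      rw [List.getD_eq_getElem s (0, 0) (by omega), List.getD_eq_getElem s (0, 0) hj]
      exact List.pairwise_iff_getElem.mp hlex i j (by omega) hj hij
    rw [if_neg (by omega : ¬ coords0.length ≤ 1)]
    have hmf := pvMf_iff coords0 s Prod.fst hperm hne
    have hmc := pvMf_iff coords0 s Prod.snd hperm hne
    have hmfb : (s.all (fun c => c.1 == (PySem.List.pyGetD s 0 (0, 0)).1))
        = (PySem.Set.len (PySem.Set.ofList (coords0.map Prod.fst)) == 1) := by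
      rw [Bool.eq_iff_iff, hmf]
      simp [PySem.Set.len, beq_iff_eq]
    have hmcb : (s.all (fun c => c.2 == (PySem.List.pyGetD s 0 (0, 0)).2))
        = (PySem.Set.len (PySem.Set.ofList (coords0.map Prod.snd)) == 1) := by
      rw [Bool.eq_iff_iff, hmc]
      simp [PySem.Set.len, beq_iff_eq]
    rw [hmfb, hmcb]
    cases hmfv : (PySem.Set.len (PySem.Set.ofList (coords0.map Prod.fst)) == 1) with
    | true =>
      -- all rows equal: A scans columns of the sorted list; B tests cols
      have hflat : ∀ c ∈ s, c.1 = (s.getD 0 (0, 0)).1 := by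
        have := hmf.mpr (by
          have := (beq_iff_eq.mp hmfv)
          simp [PySem.Set.len] at this
          exact_mod_cast this)
        rw [List.all_eq_true] at this
        intro c hc
        have h := this c hc
        rw [beq_iff_eq, PySem.List.pyGetD_zero] at h
        exact h
      have hsorted : ∀ i j : Nat, i < j → j < s.length →
          (s.getD i (0, 0)).2 ≤ (s.getD j (0, 0)).2 := by
        intro i j hij hj
        have hle := hpw i j hij hj
        have hi' : s.getD i (0, 0) ∈ s := by
          rw [List.getD_eq_getElem s (0, 0) (by omega)]
          exact List.getElem_mem _
        have hj' : s.getD j (0, 0) ∈ s := by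
          rw [List.getD_eq_getElem s (0, 0) hj]
          exact List.getElem_mem _
        exact pvLexLe_snd hle ((hflat _ hi').trans (hflat _ hj').symm)
      have hbr := pvBranch coords0 s Prod.snd hperm hn hsorted
      simpa using hbr
    | false =>
      cases hmcv : (PySem.Set.len (PySem.Set.ofList (coords0.map Prod.snd)) == 1) with
      | true =>
        have hsorted : ∀ i j : Nat, i < j → j < s.length →
            (s.getD i (0, 0)).1 ≤ (s.getD j (0, 0)).1 := by
          intro i j hij hj
          exact pvLexLe_fst (hpw i j hij hj)
        have hbr := pvBranch coords0 s Prod.fst hperm hn hsorted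
        simpa using hbr
      | false =>
        simp

-- ===== VERDICT (by name: the statement is the Claim_ definition above) =====
theorem validar_posicion_continua_spec : Claim_equal_validar_posicion_continua := by
  intro posiciones tama_o _hDom _hPre
  unfold Spec_validar_posicion_continua
  unfold validar_posicion_continua validar_posicion_continua_alt
  cases hmm : posiciones.mapM pvParseCoord with
  | none => rfl
  | some coords0 => simp only [pvContinua_eq]
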